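-- pv_equiv track=rewrite | github.com/Devid2005/Criptografia-Parcial | articulo_cientifico.py | chacha_rounds
-- ===== SOURCE A (Python) =====
-- def rotl32(x, n):
--     """
--     Realiza una rotación circular a la izquierda sobre 32 bits.
--
--     Parámetros
--     ----------
--     x : int
--         Entero de 32 bits sobre el que se rota.
--     n : int
--         Número de bits a rotar.
--
--     Retorna
--     -------
--     int :
--         Resultado de aplicar la rotación circular.
--     """
--     return ((x << n) & 0xffffffff) | (x >> (32 - n))
--
-- def quarter_round(a, b, c, d):
--     """
--     Implementa un quarter-round de ChaCha.
--
--     Este bloque opera sobre cuatro palabras de 32 bits y es el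
--     componente básico del mezclado de ChaCha. Garantiza difusión
--     y no linealidad mediante sumas módulo 2^32, XOR y rotaciones.
--
--     Parámetros
--     ----------
--     a, b, c, d : ints
--         Palabras de 32 bits del estado interno.
--
--     Retorna
--     -------
--     tuple :
--         Cuatro palabras de 32 bits actualizadas.
--     """
--     # Operaciones estándar del diseño ChaCha
--     a = (a + b) & 0xffffffff
--     d ^= a
--     d = rotl32(d, 16)
--
--     c = (c + d) & 0xffffffff
--     b ^= c
--     b = rotl32(b, 12)
--
--     a = (a + b) & 0xffffffff
--     d ^= a
--     d = rotl32(d, 8)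
--
--     c = (c + d) & 0xffffffff
--     b ^= c
--     b = rotl32(b, 7)
--
--     return a, b, c, d
--
-- def chacha_rounds(state, rounds=3):
--     """
--     Aplica 'rounds' double-rounds de ChaCha a un estado de 16 palabras.
--
--     Cada double-round consta de:
--     - una column round
--     - una diagonal round
--
--     Esta función permite reducir el número de rondas para estudiar
--     versiones debilitadas del cifrador, como en distingidores y
--     análisis estadísticos.
--
--     Parámetros
--     ----------
--     state : list[int]
--         Lista de 16 palabras de 32 bits.
--     rounds : int
--         Número de double-rounds (ChaCha20 usa rounds=10).
--
--     Retorna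
--     -------
--     list[int] :
--         El estado actualizado después de aplicar las rondas.
--     """
--     x = list(state)
--     for _ in range(rounds):
--         # Column round
--         x[0], x[4],  x[8],  x[12] = quarter_round(x[0], x[4],  x[8],  x[12])
--         x[1], x[5],  x[9],  x[13] = quarter_round(x[1], x[5],  x[9],  x[13])
--         x[2], x[6],  x[10], x[14] = quarter_round(x[2], x[6],  x[10], x[14])
--         x[3], x[7],  x[11], x[15] = quarter_round(x[3], x[7],  x[11], x[15])
--
--         # Diagonal round
--         x[0], x[5],  x[10], x[15] = quarter_round(x[0], x[5],  x[10], x[15])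
--         x[1], x[6],  x[11], x[12] = quarter_round(x[1], x[6],  x[11], x[12])
--         x[2], x[7],  x[8],  x[13] = quarter_round(x[2], x[7],  x[8],  x[13])
--         x[3], x[4],  x[9],  x[14] = quarter_round(x[3], x[4],  x[9],  x[14])
--
--     return x
-- ===== SOURCE B (Python) =====
-- def rotl32(x, n):
--     return ((x << n) & 0xffffffff) | (x >> (32 - n))
--
--
-- def quarter_round(a, b, c, d):
--     # Two identical half-rounds; only the rotation amounts differ.
--     for s1, s2 in ((16, 12), (8, 7)):
--         a = (a + b) & 0xffffffff
--         d = rotl32(d ^ a, s1)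
--         c = (c + d) & 0xffffffff
--         b = rotl32(b ^ c, s2)
--     return a, b, c, d
--
--
-- def _rot(row, k):
--     """Rotate a 4-word row left by k positions."""
--     k %= 4
--     return row[k:] + row[:k]
--
--
-- def _column_round(rows):
--     """quarter_round down each of the four columns of the 4x4 matrix."""
--     a, b, c, d = rows
--     quads = [quarter_round(a[i], b[i], c[i], d[i]) for i in range(4)]
--     return [[q[0] for q in quads], [q[1] for q in quads],
--             [q[2] for q in quads], [q[3] for q in quads]]
--
--
-- def chacha_rounds(state, rounds=3):
--     """SIMD-style formulation: keep the state as four 4-word rows; a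
--     diagonal round is a row-rotation, a column round, and the inverse
--     rotation."""
--     x = list(state)
--     rows = [x[0:4], x[4:8], x[8:12], x[12:16]]
--     for _ in range(rounds):
--         rows = _column_round(rows)
--         rows = [_rot(r, k) for k, r in enumerate(rows)]
--         rows = _column_round(rows)
--         rows = [_rot(r, 4 - k) for k, r in enumerate(rows)]
--     return [w for row in rows for w in row] + x[16:]
-- ===== Notes on version B (the rewrite author's own statement) =====
-- stated objective: alternative
-- what changed: B keeps the state as four 4-word rows and implements each double-round as a column round, a row rotation, a second column round and the inverse rotation (the SIMD/shift-rows formulation of ChaCha), instead of A's sixteen inlined indexed quarter-round assignments; quarter_round itself becomes two table-driven half-rounds.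
import Mathlib
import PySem

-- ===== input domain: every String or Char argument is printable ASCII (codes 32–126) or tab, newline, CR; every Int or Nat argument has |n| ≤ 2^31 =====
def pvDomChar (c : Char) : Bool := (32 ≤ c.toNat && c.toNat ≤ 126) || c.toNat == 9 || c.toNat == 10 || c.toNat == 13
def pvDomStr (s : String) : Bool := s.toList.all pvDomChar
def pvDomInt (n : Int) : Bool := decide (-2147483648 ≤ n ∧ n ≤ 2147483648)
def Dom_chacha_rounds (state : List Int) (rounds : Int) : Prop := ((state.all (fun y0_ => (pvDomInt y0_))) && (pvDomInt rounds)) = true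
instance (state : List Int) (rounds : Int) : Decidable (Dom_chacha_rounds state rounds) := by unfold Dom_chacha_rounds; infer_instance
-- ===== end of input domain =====

-- B re-formulates the double-round SIMD-style (four 4-word rows; diagonal round = rotate rows,
-- column round, rotate back) instead of sixteen inlined indexed quarter-round statements;
-- objective: alternative decomposition, same cost.


-- ===== PORT A =====
-- rotl32: '<<' '>>' '&' '|' are exact on Int via core shifts and PySem.Int.band/bor
def pvRotl32A (x : Int) (n : Nat) : Int :=
  PySem.Int.bor (PySem.Int.band (x <<< n) 0xffffffff) (x >>> (32 - n))

def pvQuarterA (a b c d : Int) : Int × Int × Int × Int :=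
  let a := PySem.Int.band (a + b) 0xffffffff
  let d := PySem.Int.bxor d a
  let d := pvRotl32A d 16
  let c := PySem.Int.band (c + d) 0xffffffff
  let b := PySem.Int.bxor b c
  let b := pvRotl32A b 12
  let a := PySem.Int.band (a + b) 0xffffffff
  let d := PySem.Int.bxor d a
  let d := pvRotl32A d 8
  let c := PySem.Int.band (c + d) 0xffffffff
  let b := PySem.Int.bxor b c
  let b := pvRotl32A b 7
  (a, b, c, d)

-- one 'x[i], x[j], x[k], x[l] = quarter_round(x[i], x[j], x[k], x[l])' statement;
-- indices are the in-range literals of A, so getD/set are exact (Pre_ demands 16 words)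
def pvQrAtA (x : List Int) (i j k l : Nat) : List Int :=
  let q := pvQuarterA (x.getD i 0) (x.getD j 0) (x.getD k 0) (x.getD l 0)
  (((x.set i q.1).set j q.2.1).set k q.2.2.1).set l q.2.2.2

def pvDoubleRoundA (x : List Int) : List Int :=
  let x := pvQrAtA x 0 4 8 12
  let x := pvQrAtA x 1 5 9 13
  let x := pvQrAtA x 2 6 10 14
  let x := pvQrAtA x 3 7 11 15
  let x := pvQrAtA x 0 5 10 15
  let x := pvQrAtA x 1 6 11 12
  let x := pvQrAtA x 2 7 8 13
  pvQrAtA x 3 4 9 14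

def chacha_rounds (state : List Int) (rounds : Int) : List Int :=
  (PySem.List.pyRange 0 rounds 1).foldl (fun x _ => pvDoubleRoundA x) state

-- ===== PORT B =====
def pvRotl32B (x : Int) (n : Nat) : Int :=
  PySem.Int.bor (PySem.Int.band (x <<< n) 0xffffffff) (x >>> (32 - n))

-- quarter_round as two identical half-rounds driven by the rotation amounts
def pvQuarterB (a b c d : Int) : Int × Int × Int × Int :=
  [((16 : Nat), (12 : Nat)), (8, 7)].foldl
    (fun s p =>
      match s, p with
      | (a, b, c, d), (s1, s2) =>
        let a := PySem.Int.band (a + b) 0xffffffff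
        let d := pvRotl32B (PySem.Int.bxor d a) s1
        let c := PySem.Int.band (c + d) 0xffffffff
        let b := pvRotl32B (PySem.Int.bxor b c) s2
        (a, b, c, d))
    (a, b, c, d)

-- _rot(row, k): k %= 4 (Python '%', nonneg), then row[k:] + row[:k]
def pvRotRow (row : List Int) (k : Int) : List Int :=
  let k := (PySem.Int.mod k 4).toNat
  row.drop k ++ row.take k

-- _column_round: quarter_round down each column of the 4x4 matrix
def pvColumnRound (rows : List (List Int)) : List (List Int) :=
  let a := rows.getD 0 []
  let b := rows.getD 1 []
  let c := rows.getD 2 []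
  let d := rows.getD 3 []
  let quads := (List.range 4).map
    (fun i => pvQuarterB (a.getD i 0) (b.getD i 0) (c.getD i 0) (d.getD i 0))
  [quads.map (fun q => q.1), quads.map (fun q => q.2.1),
   quads.map (fun q => q.2.2.1), quads.map (fun q => q.2.2.2)]

-- the body of B's rounds loop
def pvRoundB (rows : List (List Int)) : List (List Int) :=
  let rows := pvColumnRound rows
  let rows := (PySem.List.enumerate rows).map (fun p => pvRotRow p.2 p.1)
  let rows := pvColumnRound rows
  (PySem.List.enumerate rows).map (fun p => pvRotRow p.2 (4 - p.1))

def chacha_rounds_alt (state : List Int) (rounds : Int) : List Int :=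
  let x := state
  let rows := [PySem.List.slice x (some 0) (some 4), PySem.List.slice x (some 4) (some 8),
               PySem.List.slice x (some 8) (some 12), PySem.List.slice x (some 12) (some 16)]
  let rows := (PySem.List.pyRange 0 rounds 1).foldl (fun rows _ => pvRoundB rows) rows
  rows.flatMap id ++ PySem.List.slice x (some 16) none

-- ===== PRECONDITION & SPEC =====
-- A raises IndexError iff the loop body runs (rounds ≥ 1) on a state of fewer than 16 words;
-- exactly those inputs are excluded.
def Pre_chacha_rounds (state : List Int) (rounds : Int) : Prop := 16 ≤ state.length ∨ rounds ≤ 0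
instance (state : List Int) (rounds : Int) : Decidable (Pre_chacha_rounds state rounds) := by
  unfold Pre_chacha_rounds; infer_instance

def pvWitness_chacha_rounds : List Int × Int :=
  ([1, 2, 3, 4, 5, 6, 7, 8, 9, 10, 11, 12, 13, 14, 15, 16], 2)

def Spec_chacha_rounds (state : List Int) (rounds : Int) (out : List Int) : Prop := out = chacha_rounds_alt state rounds
instance (state : List Int) (rounds : Int) (out : List Int) : Decidable (Spec_chacha_rounds state rounds out) := by unfold Spec_chacha_rounds; infer_instance

-- ===== CLAIM (what is proved, stated in full; the proofs are below) =====
def Claim_equal_chacha_rounds : Prop := ∀ (state : List Int) (rounds : Int), Dom_chacha_rounds state rounds → Pre_chacha_rounds state rounds → Spec_chacha_rounds state rounds (chacha_rounds state rounds)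

-- ===== LEMMAS AND PROOFS =====

-- B's quarter_round (two table-driven half-rounds) computes A's quarter_round
theorem pvQuarterB_eq (a b c d : Int) : pvQuarterB a b c d = pvQuarterA a b c d := rfl

-- proof-only copies of the two round bodies with the quarter function abstracted,
-- so that reduction treats it as an atom
def pvGenQrAt (q : Int → Int → Int → Int → Int × Int × Int × Int)
    (x : List Int) (i j k l : Nat) : List Int :=
  let t := q (x.getD i 0) (x.getD j 0) (x.getD k 0) (x.getD l 0)
  (((x.set i t.1).set j t.2.1).set k t.2.2.1).set l t.2.2.2

def pvGenDouble (q : Int → Int → Int → Int → Int × Int × Int × Int)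
    (x : List Int) : List Int :=
  let x := pvGenQrAt q x 0 4 8 12
  let x := pvGenQrAt q x 1 5 9 13
  let x := pvGenQrAt q x 2 6 10 14
  let x := pvGenQrAt q x 3 7 11 15
  let x := pvGenQrAt q x 0 5 10 15
  let x := pvGenQrAt q x 1 6 11 12
  let x := pvGenQrAt q x 2 7 8 13
  pvGenQrAt q x 3 4 9 14

def pvGenColumn (q : Int → Int → Int → Int → Int × Int × Int × Int)
    (rows : List (List Int)) : List (List Int) :=
  let a := rows.getD 0 []
  let b := rows.getD 1 []
  let c := rows.getD 2 []
  let d := rows.getD 3 []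
  let quads := (List.range 4).map
    (fun i => q (a.getD i 0) (b.getD i 0) (c.getD i 0) (d.getD i 0))
  [quads.map (fun t => t.1), quads.map (fun t => t.2.1),
   quads.map (fun t => t.2.2.1), quads.map (fun t => t.2.2.2)]

def pvGenRound (q : Int → Int → Int → Int → Int × Int × Int × Int)
    (rows : List (List Int)) : List (List Int) :=
  let rows := pvGenColumn q rows
  let rows := (PySem.List.enumerate rows).map (fun p => pvRotRow p.2 p.1)
  let rows := pvGenColumn q rows
  (PySem.List.enumerate rows).map (fun p => pvRotRow p.2 (4 - p.1))

theorem pvQrAt_eq (x : List Int) (i j k l : Nat) :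
    pvQrAtA x i j k l = pvGenQrAt pvQuarterA x i j k l := rfl

theorem pvA_gen (x : List Int) : pvDoubleRoundA x = pvGenDouble pvQuarterA x := by
  simp only [pvDoubleRoundA, pvGenDouble, pvQrAt_eq]

theorem pvColumn_eq (rows : List (List Int)) :
    pvColumnRound rows = pvGenColumn pvQuarterA rows := by
  simp only [pvColumnRound, pvGenColumn, pvQuarterB_eq]

theorem pvB_gen (rows : List (List Int)) : pvRoundB rows = pvGenRound pvQuarterA rows := by
  simp only [pvRoundB, pvGenRound, pvColumn_eq]

-- single quarter-round statements, each computed on an explicit 16-word prefix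
theorem pv_qr0 (q : Int → Int → Int → Int → Int × Int × Int × Int)
    (v0 v1 v2 v3 v4 v5 v6 v7 v8 v9 v10 v11 v12 v13 v14 v15 : Int) (rest : List Int) :
    pvGenQrAt q (v0 :: v1 :: v2 :: v3 :: v4 :: v5 :: v6 :: v7 :: v8 :: v9 :: v10 :: v11 :: v12 :: v13 :: v14 :: v15 :: rest) 0 4 8 12 = (q v0 v4 v8 v12).1 :: v1 :: v2 :: v3 :: (q v0 v4 v8 v12).2.1 :: v5 :: v6 :: v7 :: (q v0 v4 v8 v12).2.2.1 :: v9 :: v10 :: v11 :: (q v0 v4 v8 v12).2.2.2 :: v13 :: v14 :: v15 :: rest := by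
  rfl
theorem pv_qr1 (q : Int → Int → Int → Int → Int × Int × Int × Int)
    (v0 v1 v2 v3 v4 v5 v6 v7 v8 v9 v10 v11 v12 v13 v14 v15 : Int) (rest : List Int) :
    pvGenQrAt q (v0 :: v1 :: v2 :: v3 :: v4 :: v5 :: v6 :: v7 :: v8 :: v9 :: v10 :: v11 :: v12 :: v13 :: v14 :: v15 :: rest) 1 5 9 13 = v0 :: (q v1 v5 v9 v13).1 :: v2 :: v3 :: v4 :: (q v1 v5 v9 v13).2.1 :: v6 :: v7 :: v8 :: (q v1 v5 v9 v13).2.2.1 :: v10 :: v11 :: v12 :: (q v1 v5 v9 v13).2.2.2 :: v14 :: v15 :: rest := by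
  rfl
theorem pv_qr2 (q : Int → Int → Int → Int → Int × Int × Int × Int)
    (v0 v1 v2 v3 v4 v5 v6 v7 v8 v9 v10 v11 v12 v13 v14 v15 : Int) (rest : List Int) :
    pvGenQrAt q (v0 :: v1 :: v2 :: v3 :: v4 :: v5 :: v6 :: v7 :: v8 :: v9 :: v10 :: v11 :: v12 :: v13 :: v14 :: v15 :: rest) 2 6 10 14 = v0 :: v1 :: (q v2 v6 v10 v14).1 :: v3 :: v4 :: v5 :: (q v2 v6 v10 v14).2.1 :: v7 :: v8 :: v9 :: (q v2 v6 v10 v14).2.2.1 :: v11 :: v12 :: v13 :: (q v2 v6 v10 v14).2.2.2 :: v15 :: rest := by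
  rfl
theorem pv_qr3 (q : Int → Int → Int → Int → Int × Int × Int × Int)
    (v0 v1 v2 v3 v4 v5 v6 v7 v8 v9 v10 v11 v12 v13 v14 v15 : Int) (rest : List Int) :
    pvGenQrAt q (v0 :: v1 :: v2 :: v3 :: v4 :: v5 :: v6 :: v7 :: v8 :: v9 :: v10 :: v11 :: v12 :: v13 :: v14 :: v15 :: rest) 3 7 11 15 = v0 :: v1 :: v2 :: (q v3 v7 v11 v15).1 :: v4 :: v5 :: v6 :: (q v3 v7 v11 v15).2.1 :: v8 :: v9 :: v10 :: (q v3 v7 v11 v15).2.2.1 :: v12 :: v13 :: v14 :: (q v3 v7 v11 v15).2.2.2 :: rest := by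
  rfl
theorem pv_qr4 (q : Int → Int → Int → Int → Int × Int × Int × Int)
    (v0 v1 v2 v3 v4 v5 v6 v7 v8 v9 v10 v11 v12 v13 v14 v15 : Int) (rest : List Int) :
    pvGenQrAt q (v0 :: v1 :: v2 :: v3 :: v4 :: v5 :: v6 :: v7 :: v8 :: v9 :: v10 :: v11 :: v12 :: v13 :: v14 :: v15 :: rest) 0 5 10 15 = (q v0 v5 v10 v15).1 :: v1 :: v2 :: v3 :: v4 :: (q v0 v5 v10 v15).2.1 :: v6 :: v7 :: v8 :: v9 :: (q v0 v5 v10 v15).2.2.1 :: v11 :: v12 :: v13 :: v14 :: (q v0 v5 v10 v15).2.2.2 :: rest := by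
  rfl
theorem pv_qr5 (q : Int → Int → Int → Int → Int × Int × Int × Int)
    (v0 v1 v2 v3 v4 v5 v6 v7 v8 v9 v10 v11 v12 v13 v14 v15 : Int) (rest : List Int) :
    pvGenQrAt q (v0 :: v1 :: v2 :: v3 :: v4 :: v5 :: v6 :: v7 :: v8 :: v9 :: v10 :: v11 :: v12 :: v13 :: v14 :: v15 :: rest) 1 6 11 12 = v0 :: (q v1 v6 v11 v12).1 :: v2 :: v3 :: v4 :: v5 :: (q v1 v6 v11 v12).2.1 :: v7 :: v8 :: v9 :: v10 :: (q v1 v6 v11 v12).2.2.1 :: (q v1 v6 v11 v12).2.2.2 :: v13 :: v14 :: v15 :: rest := by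
  rfl
theorem pv_qr6 (q : Int → Int → Int → Int → Int × Int × Int × Int)
    (v0 v1 v2 v3 v4 v5 v6 v7 v8 v9 v10 v11 v12 v13 v14 v15 : Int) (rest : List Int) :
    pvGenQrAt q (v0 :: v1 :: v2 :: v3 :: v4 :: v5 :: v6 :: v7 :: v8 :: v9 :: v10 :: v11 :: v12 :: v13 :: v14 :: v15 :: rest) 2 7 8 13 = v0 :: v1 :: (q v2 v7 v8 v13).1 :: v3 :: v4 :: v5 :: v6 :: (q v2 v7 v8 v13).2.1 :: (q v2 v7 v8 v13).2.2.1 :: v9 :: v10 :: v11 :: v12 :: (q v2 v7 v8 v13).2.2.2 :: v14 :: v15 :: rest := by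
  rfl
theorem pv_qr7 (q : Int → Int → Int → Int → Int × Int × Int × Int)
    (v0 v1 v2 v3 v4 v5 v6 v7 v8 v9 v10 v11 v12 v13 v14 v15 : Int) (rest : List Int) :
    pvGenQrAt q (v0 :: v1 :: v2 :: v3 :: v4 :: v5 :: v6 :: v7 :: v8 :: v9 :: v10 :: v11 :: v12 :: v13 :: v14 :: v15 :: rest) 3 4 9 14 = v0 :: v1 :: v2 :: (q v3 v4 v9 v14).1 :: (q v3 v4 v9 v14).2.1 :: v5 :: v6 :: v7 :: v8 :: (q v3 v4 v9 v14).2.2.1 :: v10 :: v11 :: v12 :: v13 :: (q v3 v4 v9 v14).2.2.2 :: v15 :: rest := by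
  rfl

theorem pv_col (q : Int → Int → Int → Int → Int × Int × Int × Int)
    (v0 v1 v2 v3 v4 v5 v6 v7 v8 v9 v10 v11 v12 v13 v14 v15 : Int) :
    pvGenColumn q [[v0, v1, v2, v3], [v4, v5, v6, v7], [v8, v9, v10, v11], [v12, v13, v14, v15]] = [[(q v0 v4 v8 v12).1, (q v1 v5 v9 v13).1, (q v2 v6 v10 v14).1, (q v3 v7 v11 v15).1], [(q v0 v4 v8 v12).2.1, (q v1 v5 v9 v13).2.1, (q v2 v6 v10 v14).2.1, (q v3 v7 v11 v15).2.1], [(q v0 v4 v8 v12).2.2.1, (q v1 v5 v9 v13).2.2.1, (q v2 v6 v10 v14).2.2.1, (q v3 v7 v11 v15).2.2.1], [(q v0 v4 v8 v12).2.2.2, (q v1 v5 v9 v13).2.2.2, (q v2 v6 v10 v14).2.2.2, (q v3 v7 v11 v15).2.2.2]] := by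
  rfl

theorem pv_rot0 (w x y z : Int) : pvRotRow [w, x, y, z] 0 = [w, x, y, z] := rfl
theorem pv_rot1 (w x y z : Int) : pvRotRow [w, x, y, z] 1 = [x, y, z, w] := rfl
theorem pv_rot2 (w x y z : Int) : pvRotRow [w, x, y, z] 2 = [y, z, w, x] := rfl
theorem pv_rot3 (w x y z : Int) : pvRotRow [w, x, y, z] 3 = [z, w, x, y] := rfl
theorem pv_rot4 (w x y z : Int) : pvRotRow [w, x, y, z] 4 = [w, x, y, z] := rfl

-- one B round of a literal 4x4 matrix, written out
theorem pv_round_explicit (q : Int → Int → Int → Int → Int × Int × Int × Int)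
    (v0 v1 v2 v3 v4 v5 v6 v7 v8 v9 v10 v11 v12 v13 v14 v15 : Int) :
    pvGenRound q [[v0, v1, v2, v3], [v4, v5, v6, v7], [v8, v9, v10, v11], [v12, v13, v14, v15]]
      = [[(q (q v0 v4 v8 v12).1 (q v1 v5 v9 v13).2.1 (q v2 v6 v10 v14).2.2.1 (q v3 v7 v11 v15).2.2.2).1, (q (q v1 v5 v9 v13).1 (q v2 v6 v10 v14).2.1 (q v3 v7 v11 v15).2.2.1 (q v0 v4 v8 v12).2.2.2).1, (q (q v2 v6 v10 v14).1 (q v3 v7 v11 v15).2.1 (q v0 v4 v8 v12).2.2.1 (q v1 v5 v9 v13).2.2.2).1, (q (q v3 v7 v11 v15).1 (q v0 v4 v8 v12).2.1 (q v1 v5 v9 v13).2.2.1 (q v2 v6 v10 v14).2.2.2).1], [(q (q v3 v7 v11 v15).1 (q v0 v4 v8 v12).2.1 (q v1 v5 v9 v13).2.2.1 (q v2 v6 v10 v14).2.2.2).2.1, (q (q v0 v4 v8 v12).1 (q v1 v5 v9 v13).2.1 (q v2 v6 v10 v14).2.2.1 (q v3 v7 v11 v15).2.2.2).2.1, (q (q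 v1 v5 v9 v13).1 (q v2 v6 v10 v14).2.1 (q v3 v7 v11 v15).2.2.1 (q v0 v4 v8 v12).2.2.2).2.1, (q (q v2 v6 v10 v14).1 (q v3 v7 v11 v15).2.1 (q v0 v4 v8 v12).2.2.1 (q v1 v5 v9 v13).2.2.2).2.1], [(q (q v2 v6 v10 v14).1 (q v3 v7 v11 v15).2.1 (q v0 v4 v8 v12).2.2.1 (q v1 v5 v9 v13).2.2.2).2.2.1, (q (q v3 v7 v11 v15).1 (q v0 v4 v8 v12).2.1 (q v1 v5 v9 v13).2.2.1 (q v2 v6 v10 v14).2.2.2).2.2.1, (q (q v0 v4 v8 v12).1 (q v1 v5 v9 v13).2.1 (q v2 v6 v10 v14).2.2.1 (q v3 v7 v11 v15).2.2.2).2.2.1, (q (q v1 v5 v9 v13).1 (q v2 v6 v10 v14).2.1 (q v3 v7 v11 v15).2.2.1 (q v0 v4 v8 v12).2.2.2).2.2.1], [(q (q v1 v5 v9 v13).1 (q v2 v6 v10 v14).2.1 (q v3 v7 v11 v15).2.2.1 (q v0 v4 v8 v12).2.2.2).2.2.2, (q (q v2 v6 v10 v14).1 (q v3 v7 v11 v15).2.1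 (q v0 v4 v8 v12).2.2.1 (q v1 v5 v9 v13).2.2.2).2.2.2, (q (q v3 v7 v11 v15).1 (q v0 v4 v8 v12).2.1 (q v1 v5 v9 v13).2.2.1 (q v2 v6 v10 v14).2.2.2).2.2.2, (q (q v0 v4 v8 v12).1 (q v1 v5 v9 v13).2.1 (q v2 v6 v10 v14).2.2.1 (q v3 v7 v11 v15).2.2.2).2.2.2]] := by
  simp only [pvGenRound]
  rw [pv_col]
  simp only [PySem.List.enumerate_cons, PySem.List.enumerate_nil, List.map_cons, List.map_nil]
  norm_num [pv_rot0, pv_rot1, pv_rot2, pv_rot3, pv_rot4]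
  rw [pv_col]
  simp only [PySem.List.enumerate_cons, PySem.List.enumerate_nil, List.map_cons, List.map_nil]
  norm_num [pv_rot0, pv_rot1, pv_rot2, pv_rot3, pv_rot4]

-- one A double-round on an explicit 16-word prefix, written out
theorem pv_double_explicit (q : Int → Int → Int → Int → Int × Int × Int × Int)
    (v0 v1 v2 v3 v4 v5 v6 v7 v8 v9 v10 v11 v12 v13 v14 v15 : Int) (rest : List Int) :
    pvGenDouble q (v0 :: v1 :: v2 :: v3 :: v4 :: v5 :: v6 :: v7 :: v8 :: v9 :: v10 :: v11 :: v12 :: v13 :: v14 :: v15 :: rest)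
      = (q (q v0 v4 v8 v12).1 (q v1 v5 v9 v13).2.1 (q v2 v6 v10 v14).2.2.1 (q v3 v7 v11 v15).2.2.2).1 ::
      (q (q v1 v5 v9 v13).1 (q v2 v6 v10 v14).2.1 (q v3 v7 v11 v15).2.2.1 (q v0 v4 v8 v12).2.2.2).1 ::
      (q (q v2 v6 v10 v14).1 (q v3 v7 v11 v15).2.1 (q v0 v4 v8 v12).2.2.1 (q v1 v5 v9 v13).2.2.2).1 ::
      (q (q v3 v7 v11 v15).1 (q v0 v4 v8 v12).2.1 (q v1 v5 v9 v13).2.2.1 (q v2 v6 v10 v14).2.2.2).1 ::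
      (q (q v3 v7 v11 v15).1 (q v0 v4 v8 v12).2.1 (q v1 v5 v9 v13).2.2.1 (q v2 v6 v10 v14).2.2.2).2.1 ::
      (q (q v0 v4 v8 v12).1 (q v1 v5 v9 v13).2.1 (q v2 v6 v10 v14).2.2.1 (q v3 v7 v11 v15).2.2.2).2.1 ::
      (q (q v1 v5 v9 v13).1 (q v2 v6 v10 v14).2.1 (q v3 v7 v11 v15).2.2.1 (q v0 v4 v8 v12).2.2.2).2.1 ::
      (q (q v2 v6 v10 v14).1 (q v3 v7 v11 v15).2.1 (q v0 v4 v8 v12).2.2.1 (q v1 v5 v9 v13).2.2.2).2.1 ::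
      (q (q v2 v6 v10 v14).1 (q v3 v7 v11 v15).2.1 (q v0 v4 v8 v12).2.2.1 (q v1 v5 v9 v13).2.2.2).2.2.1 ::
      (q (q v3 v7 v11 v15).1 (q v0 v4 v8 v12).2.1 (q v1 v5 v9 v13).2.2.1 (q v2 v6 v10 v14).2.2.2).2.2.1 ::
      (q (q v0 v4 v8 v12).1 (q v1 v5 v9 v13).2.1 (q v2 v6 v10 v14).2.2.1 (q v3 v7 v11 v15).2.2.2).2.2.1 ::
      (q (q v1 v5 v9 v13).1 (q v2 v6 v10 v14).2.1 (q v3 v7 v11 v15).2.2.1 (q v0 v4 v8 v12).2.2.2).2.2.1 ::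
      (q (q v1 v5 v9 v13).1 (q v2 v6 v10 v14).2.1 (q v3 v7 v11 v15).2.2.1 (q v0 v4 v8 v12).2.2.2).2.2.2 ::
      (q (q v2 v6 v10 v14).1 (q v3 v7 v11 v15).2.1 (q v0 v4 v8 v12).2.2.1 (q v1 v5 v9 v13).2.2.2).2.2.2 ::
      (q (q v3 v7 v11 v15).1 (q v0 v4 v8 v12).2.1 (q v1 v5 v9 v13).2.2.1 (q v2 v6 v10 v14).2.2.2).2.2.2 ::
      (q (q v0 v4 v8 v12).1 (q v1 v5 v9 v13).2.1 (q v2 v6 v10 v14).2.2.1 (q v3 v7 v11 v15).2.2.2).2.2.2 ::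
      rest := by
  simp only [pvGenDouble, pv_qr0, pv_qr1, pv_qr2, pv_qr3, pv_qr4, pv_qr5, pv_qr6, pv_qr7]

-- one double-round on an explicit 16-word prefix agrees with one B round on the rows
theorem pv_step (q : Int → Int → Int → Int → Int × Int × Int × Int)
    (v0 v1 v2 v3 v4 v5 v6 v7 v8 v9 v10 v11 v12 v13 v14 v15 : Int) (rest : List Int) :
    pvGenDouble q (v0 :: v1 :: v2 :: v3 :: v4 :: v5 :: v6 :: v7 :: v8 :: v9 :: v10 :: v11 :: v12 :: v13 :: v14 :: v15 :: rest)
      = (pvGenRound q [[v0, v1, v2, v3], [v4, v5, v6, v7], [v8, v9, v10, v11], [v12, v13, v14, v15]]).flatMap id ++ rest := by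
  rw [pv_double_explicit, pv_round_explicit]
  simp [List.flatMap]

-- one B round of a literal 4x4 matrix is again a literal 4x4 matrix
theorem pv_shape (q : Int → Int → Int → Int → Int × Int × Int × Int)
    (v0 v1 v2 v3 v4 v5 v6 v7 v8 v9 v10 v11 v12 v13 v14 v15 : Int) :
    ∃ w0 w1 w2 w3 w4 w5 w6 w7 w8 w9 w10 w11 w12 w13 w14 w15 : Int,
      pvGenRound q [[v0, v1, v2, v3], [v4, v5, v6, v7], [v8, v9, v10, v11], [v12, v13, v14, v15]]
        = [[w0, w1, w2, w3], [w4, w5, w6, w7], [w8, w9, w10, w11], [w12, w13, w14, w15]] :=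
  ⟨_, _, _, _, _, _, _, _, _, _, _, _, _, _, _, _, pv_round_explicit q v0 v1 v2 v3 v4 v5 v6 v7 v8 v9 v10 v11 v12 v13 v14 v15⟩

theorem pv_fold (l : List Int) :
    ∀ (a0 a1 a2 a3 b0 b1 b2 b3 c0 c1 c2 c3 d0 d1 d2 d3 : Int) (rest : List Int),
      l.foldl (fun x _ => pvGenDouble pvQuarterA x)
          (a0 :: a1 :: a2 :: a3 :: b0 :: b1 :: b2 :: b3 ::
            c0 :: c1 :: c2 :: c3 :: d0 :: d1 :: d2 :: d3 :: rest)
        = (l.foldl (fun rows _ => pvGenRound pvQuarterA rows)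
              [[a0, a1, a2, a3], [b0, b1, b2, b3], [c0, c1, c2, c3], [d0, d1, d2, d3]]).flatMap id
            ++ rest := by
  induction l with
  | nil => intro a0 a1 a2 a3 b0 b1 b2 b3 c0 c1 c2 c3 d0 d1 d2 d3 rest; rfl
  | cons h t ih =>
    intro a0 a1 a2 a3 b0 b1 b2 b3 c0 c1 c2 c3 d0 d1 d2 d3 rest
    obtain ⟨w0, w1, w2, w3, w4, w5, w6, w7, w8, w9, w10, w11, w12, w13, w14, w15, hw⟩ :=
      pv_shape pvQuarterA a0 a1 a2 a3 b0 b1 b2 b3 c0 c1 c2 c3 d0 d1 d2 d3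
    simp only [List.foldl_cons, pv_step, hw]
    simpa [List.flatMap] using
      ih w0 w1 w2 w3 w4 w5 w6 w7 w8 w9 w10 w11 w12 w13 w14 w15 rest

-- ===== VERDICT (by name: the statement is the Claim_ definition above) =====
theorem chacha_rounds_spec : Claim_equal_chacha_rounds := by
  intro state rounds _ hpre
  unfold Pre_chacha_rounds at hpre
  unfold Spec_chacha_rounds
  by_cases hr : rounds ≤ 0
  · -- the rounds loop never runs: both sides return the state unchanged
    have hnil : PySem.List.pyRange 0 rounds 1 = [] := PySem.List.pyRange_one_eq_nil (by omega)
    simp only [chacha_rounds, chacha_rounds_alt, hnil, List.foldl_nil]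
    rw [PySem.List.slice_toNat _ (by norm_num) (by norm_num),
        PySem.List.slice_toNat _ (by norm_num) (by norm_num),
        PySem.List.slice_toNat _ (by norm_num) (by norm_num),
        PySem.List.slice_toNat _ (by norm_num) (by norm_num),
        PySem.List.slice_from _ (by norm_num)]
    symm
    norm_num
    show state.take 4 ++ ((state.drop 4).take 4 ++ ((state.drop 8).take 4 ++
      ((state.drop 12).take 4 ++ state.drop 16))) = state
    have e1 : state.drop 16 = (state.drop 12).drop 4 := by simp [List.drop_drop]
    have e2 : state.drop 12 = (state.drop 8).drop 4 := by simp [List.drop_drop]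
    have e3 : state.drop 8 = (state.drop 4).drop 4 := by simp [List.drop_drop]
    rw [e1, List.take_append_drop, e2, List.take_append_drop, e3, List.take_append_drop,
        List.take_append_drop]
  · have hlen : 16 ≤ state.length := by
      rcases hpre with h | h
      · exact h
      · omega
    obtain ⟨a0, state, rfl⟩ : ∃ y ys, state = y :: ys := by
      cases state with | nil => simp at hlen | cons y ys => exact ⟨y, ys, rfl⟩
    obtain ⟨a1, state, rfl⟩ : ∃ y ys, state = y :: ys := by
      cases state with | nil => simp at hlen | cons y ys => exact ⟨y, ys, rfl⟩
    obtain ⟨a2, state, rfl⟩ : ∃ y ys, state = y :: ys := by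
      cases state with | nil => simp at hlen | cons y ys => exact ⟨y, ys, rfl⟩
    obtain ⟨a3, state, rfl⟩ : ∃ y ys, state = y :: ys := by
      cases state with | nil => simp at hlen | cons y ys => exact ⟨y, ys, rfl⟩
    obtain ⟨b0, state, rfl⟩ : ∃ y ys, state = y :: ys := by
      cases state with | nil => simp at hlen | cons y ys => exact ⟨y, ys, rfl⟩
    obtain ⟨b1, state, rfl⟩ : ∃ y ys, state = y :: ys := by
      cases state with | nil => simp at hlen | cons y ys => exact ⟨y, ys, rfl⟩
    obtain ⟨b2, state, rfl⟩ : ∃ y ys, state = y :: ys := by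
      cases state with | nil => simp at hlen | cons y ys => exact ⟨y, ys, rfl⟩
    obtain ⟨b3, state, rfl⟩ : ∃ y ys, state = y :: ys := by
      cases state with | nil => simp at hlen | cons y ys => exact ⟨y, ys, rfl⟩
    obtain ⟨c0, state, rfl⟩ : ∃ y ys, state = y :: ys := by
      cases state with | nil => simp at hlen | cons y ys => exact ⟨y, ys, rfl⟩
    obtain ⟨c1, state, rfl⟩ : ∃ y ys, state = y :: ys := by
      cases state with | nil => simp at hlen | cons y ys => exact ⟨y, ys, rfl⟩
    obtain ⟨c2, state, rfl⟩ : ∃ y ys, state = y :: ys := by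
      cases state with | nil => simp at hlen | cons y ys => exact ⟨y, ys, rfl⟩
    obtain ⟨c3, state, rfl⟩ : ∃ y ys, state = y :: ys := by
      cases state with | nil => simp at hlen | cons y ys => exact ⟨y, ys, rfl⟩
    obtain ⟨d0, state, rfl⟩ : ∃ y ys, state = y :: ys := by
      cases state with | nil => simp at hlen | cons y ys => exact ⟨y, ys, rfl⟩
    obtain ⟨d1, state, rfl⟩ : ∃ y ys, state = y :: ys := by
      cases state with | nil => simp at hlen | cons y ys => exact ⟨y, ys, rfl⟩
    obtain ⟨d2, state, rfl⟩ : ∃ y ys, state = y :: ys := by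
      cases state with | nil => simp at hlen | cons y ys => exact ⟨y, ys, rfl⟩
    obtain ⟨d3, state, rfl⟩ : ∃ y ys, state = y :: ys := by
      cases state with | nil => simp at hlen | cons y ys => exact ⟨y, ys, rfl⟩
    show chacha_rounds _ rounds = chacha_rounds_alt _ rounds
    simp only [chacha_rounds, chacha_rounds_alt, pvA_gen, pvB_gen]
    rw [PySem.List.slice_toNat _ (by norm_num) (by norm_num),
        PySem.List.slice_toNat _ (by norm_num) (by norm_num),
        PySem.List.slice_toNat _ (by norm_num) (by norm_num),
        PySem.List.slice_toNat _ (by norm_num) (by norm_num),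
        PySem.List.slice_from _ (by norm_num)]
    exact pv_fold (PySem.List.pyRange 0 rounds 1) a0 a1 a2 a3 b0 b1 b2 b3 c0 c1 c2 c3 d0 d1 d2 d3 state
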